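-- pv_equiv track=rewrite | github.com/PlanSK/Codewars_solutions | UncollapseDigits.py | uncollapse
-- ===== SOURCE A (Python) =====
-- def uncollapse(digits):
--     digits_list = ['zero', 'one', 'two', 'three', 'four', 'five', 'six', 'seven', 'eight', 'nine']
--     temp_str = digits
--     digit_words = []
--     for _ in range(len(digits)):
--         for digit in digits_list:
--             if temp_str.startswith(digit):
--                 digit_words.append(temp_str[:len(digit)])
--                 temp_str = temp_str[len(digit):]
--     return ' '.join(digit_words)
-- ===== SOURCE B (Python) =====
-- # Single forward pass: at each position pick the digit word by its first letter
-- # (at most two candidates), compare in place, and advance by its length.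
-- BY_FIRST = {
--     'z': ('zero',), 'o': ('one',), 't': ('two', 'three'), 'f': ('four', 'five'),
--     's': ('six', 'seven'), 'e': ('eight',), 'n': ('nine',),
-- }
--
-- def uncollapse(digits):
--     out = []
--     i = 0
--     n = len(digits)
--     while i < n:
--         for w in BY_FIRST.get(digits[i], ()):
--             if digits.startswith(w, i):
--                 out.append(w)
--                 i += len(w)
--                 break
--         else:
--             break
--     return ' '.join(out)
-- ===== Notes on version B (the rewrite author's own statement) =====
-- stated objective: faster
-- what changed: A rescans all ten digit words len(digits) times, re-slicing the remaining string on every match; B makes one forward pass with an index pointer, selecting the (at most two) candidate words by the current first letter and matching in place with str.startswith(w, i).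
import Mathlib
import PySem

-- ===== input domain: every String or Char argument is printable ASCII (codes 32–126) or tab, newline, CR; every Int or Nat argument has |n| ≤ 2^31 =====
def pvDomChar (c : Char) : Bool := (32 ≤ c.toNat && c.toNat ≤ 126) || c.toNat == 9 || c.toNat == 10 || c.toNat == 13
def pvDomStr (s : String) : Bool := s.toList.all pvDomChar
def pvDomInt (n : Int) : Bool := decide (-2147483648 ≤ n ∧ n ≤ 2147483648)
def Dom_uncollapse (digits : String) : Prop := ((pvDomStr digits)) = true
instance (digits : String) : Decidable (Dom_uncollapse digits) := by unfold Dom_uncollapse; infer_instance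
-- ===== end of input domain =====

-- B replaces A's repeated restart-scans over all ten digit words (with quadratic
-- re-slicing of the remaining string) by one forward index pass that picks the
-- word from the current first letter; objective: faster (asymptotic).

-- ===== PORT A =====
-- A's list of the ten digit words, as lists of code points (strings are handled
-- at the List Char level via PySem.Chars, exact on this ASCII input).
def pvWords : List (List Char) :=
  [['z','e','r','o'], ['o','n','e'], ['t','w','o'], ['t','h','r','e','e'],
   ['f','o','u','r'], ['f','i','v','e'], ['s','i','x'], ['s','e','v','e','n'],
   ['e','i','g','h','t'], ['n','i','n','e']]

-- body of A's inner 'for digit in digits_list' loop: temp_str[:len(digit)] and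
-- temp_str[len(digit):] are the PySem slices with the nonnegative bound len(digit)
def pvStepA (st : List Char × List (List Char)) (digit : List Char) :
    List Char × List (List Char) :=
  if PySem.Chars.startswith st.1 digit then
    (PySem.Chars.slice st.1 (some (PySem.Chars.len digit)) none,
     st.2 ++ [PySem.Chars.slice st.1 none (some (PySem.Chars.len digit))])
  else st

def uncollapse (digits : String) : String :=
  -- for _ in range(len(digits)): for digit in digits_list: …
  let res := (List.range digits.toList.length).foldl
    (fun st _ => pvWords.foldl pvStepA st) (digits.toList, [])
  String.ofList (PySem.Chars.join [' '] res.2)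

-- ===== PORT B =====
-- BY_FIRST.get(digits[i], ()) — the literal dict lookup by first character
def pvCands (c : Char) : List (List Char) :=
  if c = 'z' then [['z','e','r','o']]
  else if c = 'o' then [['o','n','e']]
  else if c = 't' then [['t','w','o'], ['t','h','r','e','e']]
  else if c = 'f' then [['f','o','u','r'], ['f','i','v','e']]
  else if c = 's' then [['s','i','x'], ['s','e','v','e','n']]
  else if c = 'e' then [['e','i','g','h','t']]
  else if c = 'n' then [['n','i','n','e']]
  else []

-- B's while loop: i advancing through digits becomes recursion on the suffix;
-- the inner for-with-break is the first candidate w with digits.startswith(w, i);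
-- 'i += len(w)' drops len(w) characters: the matched head c plus len(w)-1 more
def pvAltGo : List Char → List (List Char)
  | [] => []
  | c :: rest =>
    match (pvCands c).find? (fun w => PySem.Chars.startswith (c :: rest) w) with
    | some w => w :: pvAltGo (rest.drop (w.length - 1))
    | none => []
termination_by l => l.length
decreasing_by simp [List.length_drop]

def uncollapse_alt (digits : String) : String :=
  String.ofList (PySem.Chars.join [' '] (pvAltGo digits.toList))

-- ===== PRECONDITION & SPEC =====
def Spec_uncollapse (digits : String) (out : String) : Prop := out = uncollapse_alt digits
instance (digits : String) (out : String) : Decidable (Spec_uncollapse digits out) := by unfold Spec_uncollapse; infer_instance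

-- ===== CLAIM (what is proved, stated in full; the proofs are below) =====
def Claim_equal_uncollapse : Prop := ∀ (digits : String), Dom_uncollapse digits → Spec_uncollapse digits (uncollapse digits)

-- ===== LEMMAS AND PROOFS =====

theorem pvCands_sub (c : Char) (w : List Char) (h : w ∈ pvCands c) : w ∈ pvWords := by
  unfold pvCands at h
  split_ifs at h <;> simp_all [pvWords] <;> tauto

-- B takes exactly one greedy step when a word matches …
theorem pvAltGo_step {d : List Char} (r : List Char) (hd : d ∈ pvWords) :
    pvAltGo (d ++ r) = d :: pvAltGo r := by
  fin_cases hd <;>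
    · simp only [List.cons_append, List.nil_append]
      rw [pvAltGo]
      simp [pvCands, PySem.Chars.startswith, List.find?, List.isPrefixOf]

-- … and stops exactly when no word matches
theorem pvAltGo_stuck {t : List Char} (h : ∀ d ∈ pvWords, ¬ d <+: t) : pvAltGo t = [] := by
  cases t with
  | nil => rw [pvAltGo]
  | cons c rest =>
    rw [pvAltGo]
    have : (pvCands c).find? (fun w => PySem.Chars.startswith (c :: rest) w) = none := by
      apply List.find?_eq_none.mpr
      intro w hw
      simp only [PySem.Chars.startswith, List.isPrefixOf_iff_prefix]
      exact h w (pvCands_sub c w hw)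
    simp [this]

-- unfolding of one inner-loop step of A
theorem pvStepA_eq (st : List Char × List (List Char)) (d : List Char) :
    pvStepA st d =
      if d.isPrefixOf st.1 then (st.1.drop d.length, st.2 ++ [st.1.take d.length]) else st := by
  unfold pvStepA
  simp only [PySem.Chars.startswith, PySem.Chars.slice_eq_listSlice, PySem.Chars.len_eq,
    PySem.List.slice_from_natCast, PySem.List.slice_to_natCast]

-- one pass of A's inner loop over a sublist of the words consumes an initial
-- segment of B's greedy decomposition
theorem pvPass (ds : List (List Char)) (hds : ∀ d ∈ ds, d ∈ pvWords) :
    ∀ t acc, ∃ t' ws, ds.foldl pvStepA (t, acc) = (t', acc ++ ws) ∧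
      pvAltGo t = ws ++ pvAltGo t' ∧
      (ws = [] → t' = t ∧ ∀ d ∈ ds, ¬ d <+: t) := by
  induction ds with
  | nil => intro t acc; exact ⟨t, [], by simp, by simp, by simp⟩
  | cons d ds ih =>
    intro t acc
    have hd : d ∈ pvWords := hds d (by simp)
    have hds' : ∀ e ∈ ds, e ∈ pvWords := fun e he => hds e (by simp [he])
    by_cases hp : d <+: t
    · obtain ⟨r, rfl⟩ := hp
      obtain ⟨t', ws, hfold, hgo, _⟩ := ih hds' r (acc ++ [d])
      refine ⟨t', d :: ws, ?_, ?_, by simp⟩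
      · simp only [List.foldl_cons, pvStepA_eq, List.isPrefixOf_iff_prefix,
          if_pos (List.prefix_append d r), List.take_left, List.drop_left]
        simpa using hfold
      · rw [pvAltGo_step r hd, hgo]; simp
    · obtain ⟨t', ws, hfold, hgo, hnil⟩ := ih hds' t acc
      refine ⟨t', ws, ?_, hgo, ?_⟩
      · simpa only [List.foldl_cons, pvStepA_eq, List.isPrefixOf_iff_prefix, if_neg hp] using hfold
      · intro hws
        obtain ⟨ht, hall⟩ := hnil hws
        exact ⟨ht, by intro e he; rcases List.mem_cons.mp he with rfl | he'
                      · exact hp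
                      · exact hall e he'⟩

-- folding over range n while ignoring the element is n-fold iteration
theorem pvFoldRange {α : Type} (f : α → α) (n : ℕ) (st : α) :
    (List.range n).foldl (fun s _ => f s) st = f^[n] st := by
  induction n generalizing st with
  | zero => simp
  | succ k ih =>
    have : ∀ (l : List ℕ) (s : α), l.foldl (fun s _ => f s) s = f^[l.length] s := by
      intro l
      induction l with
      | nil => intro s; simp
      | cons a l ihl => intro s; simp [ihl, Function.iterate_succ_apply]
    simpa using this (List.range (k + 1)) st

-- n outer passes finish the whole greedy decomposition once n bounds its length
theorem pvIter (n : ℕ) : ∀ t acc, (pvAltGo t).length ≤ n →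
    ∃ t', (fun st => pvWords.foldl pvStepA st)^[n] (t, acc) = (t', acc ++ pvAltGo t) := by
  induction n with
  | zero =>
    intro t acc h
    have : pvAltGo t = [] := List.eq_nil_of_length_eq_zero (Nat.le_zero.mp h)
    exact ⟨t, by simp [this]⟩
  | succ k ih =>
    intro t acc h
    obtain ⟨t₁, ws, hfold, hgo, hnil⟩ := pvPass pvWords (fun _ h => h) t acc
    have hb : (pvAltGo t₁).length ≤ k := by
      cases ws with
      | nil =>
        obtain ⟨rfl, hall⟩ := hnil rfl
        have : pvAltGo t₁ = [] := pvAltGo_stuck hall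
        simp [this]
      | cons w ws' =>
        have := congrArg List.length hgo
        simp at this; omega
    obtain ⟨t', hiter⟩ := ih t₁ (acc ++ ws) hb
    refine ⟨t', ?_⟩
    rw [Function.iterate_succ_apply, hfold, hiter, hgo]
    simp

-- the greedy decomposition never has more words than characters
theorem pvAltGo_len (t : List Char) : (pvAltGo t).length ≤ t.length := by
  induction t using pvAltGo.induct with
  | case1 => rw [pvAltGo]; simp
  | case2 c rest w h ih =>
    rw [pvAltGo, h]
    simp only [List.length_cons]
    simp [List.length_drop] at ih ⊢
    omega
  | case3 c rest h =>
    rw [pvAltGo, h]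
    simp

-- ===== VERDICT (by name: the statement is the Claim_ definition above) =====
theorem uncollapse_spec : Claim_equal_uncollapse := by
  intro digits _
  unfold Spec_uncollapse uncollapse uncollapse_alt
  obtain ⟨t', h⟩ := pvIter digits.toList.length digits.toList []
    (pvAltGo_len digits.toList)
  simp only [pvFoldRange, h]
  simp
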